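-- pv_equiv track=rewrite | github.com/Erc-prog-xD/starwars-api | src/utils/filters.py | apply_smart_filters
-- ===== SOURCE A (Python) =====
-- EXACT_FIELDS = {"gender", "birth_year"}
--
-- def apply_smart_filters(data, filters):
--     for key, value in filters.items():
--         if value is None:
--             continue
--
--         value = str(value).lower()
--
--         if key in EXACT_FIELDS:
--             data = [
--                 item for item in data
--                 if str(item.get(key, "")).lower() == value
--             ]
--         else:
--             data = [
--                 item for item in data
--                 if value in str(item.get(key, "")).lower()
--             ]
--
--     return data
-- ===== SOURCE B (Python) =====
-- EXACT_FIELDS = {"gender", "birth_year"}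
--
-- def apply_smart_filters(data, filters):
--     active = [(k, str(v).lower()) for k, v in filters.items() if v is not None]
--     return [
--         item for item in data
--         if all(
--             (str(item.get(k, "")).lower() == v) if k in EXACT_FIELDS
--             else (v in str(item.get(k, "")).lower())
--             for k, v in active
--         )
--     ]
-- ===== Notes on version B (the rewrite author's own statement) =====
-- stated objective: alternative
-- what changed: B pre-normalises the active filters once and makes a single pass over the items, keeping each item iff it satisfies all filters via all(...), instead of A's sequential per-filter narrowing list rebuilds.
import Mathlib
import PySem

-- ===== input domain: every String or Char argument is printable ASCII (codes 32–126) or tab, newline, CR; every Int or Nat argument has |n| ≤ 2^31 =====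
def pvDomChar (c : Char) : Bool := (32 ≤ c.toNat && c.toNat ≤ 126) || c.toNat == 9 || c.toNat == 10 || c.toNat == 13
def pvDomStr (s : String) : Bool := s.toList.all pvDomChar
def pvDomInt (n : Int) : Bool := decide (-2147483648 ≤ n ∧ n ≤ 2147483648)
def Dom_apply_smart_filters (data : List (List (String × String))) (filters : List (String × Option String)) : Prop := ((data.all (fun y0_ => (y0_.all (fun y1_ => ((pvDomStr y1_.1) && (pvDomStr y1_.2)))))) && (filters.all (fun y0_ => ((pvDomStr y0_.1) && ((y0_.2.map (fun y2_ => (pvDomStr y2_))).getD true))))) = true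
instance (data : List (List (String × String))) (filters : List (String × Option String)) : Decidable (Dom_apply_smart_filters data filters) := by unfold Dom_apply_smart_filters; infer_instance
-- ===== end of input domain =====

-- B pre-normalises the active filters once and keeps each item iff it passes all of them in a single pass over data (alternative decomposition; same asymptotic cost).


-- shared primitive: item.get(key, "") on an association list (first match, Python-dict lookup)
def pvGetField (item : List (String × String)) (k : String) : String :=
  ((item.find? (fun p => p.1 == k)).map Prod.snd).getD ""

-- ===== PORT A =====
-- A: for each active filter in turn, rebuild data keeping only the items that pass it.
def apply_smart_filters (data : List (List (String × String))) (filters : List (String × Option String)) : List (List (String × String)) :=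
  filters.foldl
    (fun d kv =>
      match kv.2 with
      | none => d
      | some s =>
        let v := PySem.Str.lower s
        if kv.1 = "gender" ∨ kv.1 = "birth_year" then
          d.filter (fun item => PySem.Str.lower (pvGetField item kv.1) == v)
        else
          d.filter (fun item => PySem.Str.isIn v (PySem.Str.lower (pvGetField item kv.1))))
    data

-- ===== PORT B =====
-- B: normalise the active filters once, then one filter pass over data with an all(...) test.
def pvActive (filters : List (String × Option String)) : List (String × String) :=
  filters.filterMap (fun kv => kv.2.map (fun s => (kv.1, PySem.Str.lower s)))

def pvPasses (item : List (String × String)) (kv : String × String) : Bool :=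
  if kv.1 = "gender" ∨ kv.1 = "birth_year" then
    PySem.Str.lower (pvGetField item kv.1) == kv.2
  else
    PySem.Str.isIn kv.2 (PySem.Str.lower (pvGetField item kv.1))

def apply_smart_filters_alt (data : List (List (String × String))) (filters : List (String × Option String)) : List (List (String × String)) :=
  data.filter (fun item => (pvActive filters).all (fun kv => pvPasses item kv))

-- ===== PRECONDITION & SPEC =====
def Spec_apply_smart_filters (data : List (List (String × String))) (filters : List (String × Option String)) (out : List (List (String × String))) : Prop := out = apply_smart_filters_alt data filters
instance (data : List (List (String × String))) (filters : List (String × Option String)) (out : List (List (String × String))) : Decidable (Spec_apply_smart_filters data filters out) := by unfold Spec_apply_smart_filters; infer_instance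

-- ===== CLAIM (what is proved, stated in full; the proofs are below) =====
def Claim_equal_apply_smart_filters : Prop := ∀ (data : List (List (String × String))) (filters : List (String × Option String)), Dom_apply_smart_filters data filters → Spec_apply_smart_filters data filters (apply_smart_filters data filters)

-- ===== LEMMAS AND PROOFS =====

-- Sequential narrowing by each active filter equals one filter by the conjunction of their tests.
theorem pvFoldEqFilter (filters : List (String × Option String)) (data : List (List (String × String))) :
    apply_smart_filters data filters = data.filter (fun item => (pvActive filters).all (fun kv => pvPasses item kv)) := by
  induction filters generalizing data with
  | nil => simp [apply_smart_filters, pvActive]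
  | cons kv rest ih =>
    obtain ⟨k, v⟩ := kv
    cases v with
    | none =>
      have h : apply_smart_filters data ((k, none) :: rest) = apply_smart_filters data rest := rfl
      rw [h, ih]
      simp [pvActive]
    | some s =>
      have h : apply_smart_filters data ((k, some s) :: rest) =
          apply_smart_filters (data.filter (fun item => pvPasses item (k, PySem.Str.lower s))) rest := by
        simp only [apply_smart_filters, List.foldl_cons, pvPasses]
        split_ifs with hk <;> simp
      rw [h, ih, List.filter_filter]
      simp only [pvActive, List.filterMap_cons, Option.map_some]
      rw [List.filter_congr]
      intro x _
      simp [Bool.and_comm]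

-- ===== VERDICT (by name: the statement is the Claim_ definition above) =====
theorem apply_smart_filters_spec : Claim_equal_apply_smart_filters := by
  intro data filters _
  unfold Spec_apply_smart_filters apply_smart_filters_alt
  exact pvFoldEqFilter filters data
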